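-- pv_equiv track=rewrite | github.com/KarthikGandu/jobs | job_search_app/services/resume_parser.py | determine_highest_degree
-- ===== SOURCE A (Python) =====
-- from typing import Dict, List, Optional
--
-- def determine_highest_degree(education: List[Dict[str, str]]) -> Optional[str]:
--     """Determine highest degree level"""
--     degree_hierarchy = {
--         'phd': 5, 'doctorate': 5,
--         'master': 4, 'mba': 4, 'ms': 4, 'ma': 4,
--         'bachelor': 3, 'bs': 3, 'ba': 3,
--         'associate': 2
--     }
--
--     if not education:
--         return None
--
--     max_level = 0
--     highest = None
--
--     for edu in education:
--         degree = edu['degree'].lower()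
--         level = degree_hierarchy.get(degree, 0)
--         if level > max_level:
--             max_level = level
--             highest = edu['degree']
--
--     return highest
-- ===== SOURCE B (Python) =====
-- from typing import Dict, List, Optional
--
-- def determine_highest_degree(education: List[Dict[str, str]]) -> Optional[str]:
--     """Determine highest degree level: scan hierarchy tiers from highest down."""
--     degree_hierarchy = {
--         'phd': 5, 'doctorate': 5,
--         'master': 4, 'mba': 4, 'ms': 4, 'ma': 4,
--         'bachelor': 3, 'bs': 3, 'ba': 3,
--         'associate': 2
--     }
--     for level in (5, 4, 3, 2):
--         for edu in education:
--             degree = edu['degree']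
--             if degree_hierarchy.get(degree.lower(), 0) == level:
--                 return degree
--     return None
-- ===== Notes on version B (the rewrite author's own statement) =====
-- stated objective: alternative
-- what changed: Replaces the single max-tracking accumulator pass with an outer loop over hierarchy tiers 5..2 that returns the first education entry matching the highest occupied tier.
import Mathlib
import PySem

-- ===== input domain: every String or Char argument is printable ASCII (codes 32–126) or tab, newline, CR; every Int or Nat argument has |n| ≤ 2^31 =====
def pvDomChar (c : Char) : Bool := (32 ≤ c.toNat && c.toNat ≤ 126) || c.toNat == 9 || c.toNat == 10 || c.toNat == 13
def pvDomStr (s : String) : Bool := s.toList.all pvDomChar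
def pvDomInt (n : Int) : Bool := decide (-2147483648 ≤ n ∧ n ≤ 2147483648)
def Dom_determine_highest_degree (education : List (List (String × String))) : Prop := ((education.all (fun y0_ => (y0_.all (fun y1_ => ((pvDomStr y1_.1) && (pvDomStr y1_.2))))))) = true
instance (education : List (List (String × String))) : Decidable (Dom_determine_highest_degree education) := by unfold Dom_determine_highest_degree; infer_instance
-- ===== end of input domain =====

-- B re-implements the tier search: instead of A's max-tracking pass, it scans hierarchy
-- tiers from 5 down to 2 and returns the first entry of the highest occupied tier.


-- shared literal from both Pythons: the degree_hierarchy dict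
def degreeHierarchy : PySem.Dict String Int :=
  PySem.Dict.mk [("phd", 5), ("doctorate", 5), ("master", 4), ("mba", 4), ("ms", 4),
                 ("ma", 4), ("bachelor", 3), ("bs", 3), ("ba", 3), ("associate", 2)]

-- ===== PORT A =====
-- edu['degree'] raises KeyError when absent: the loop returns none (the crash) then,
-- excluded by Pre_ below.
def aLoop : List (List (String × String)) → Int → Option String → Option (Option String)
  | [], _, highest => some highest
  | edu :: rest, maxLevel, highest =>
    match (edu.find? (fun kv => kv.1 == "degree")).map (·.2) with
    | none => none  -- KeyError
    | some d =>
      let degree := PySem.Str.lower d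
      let level := PySem.Dict.getD degreeHierarchy degree 0
      if maxLevel < level then aLoop rest level (some d)
      else aLoop rest maxLevel highest

def determine_highest_degree (education : List (List (String × String))) : Option String :=
  if education = [] then none
  else (aLoop education 0 none).getD none

-- ===== PORT B =====
-- inner loop: first entry whose lowered degree sits exactly at tier L
-- (edu['degree'] raises KeyError when absent: the outer none is the crash, excluded by Pre_)
def bScan (L : Int) : List (List (String × String)) → Option (Option String)
  | [] => some none
  | edu :: rest =>
    match (edu.find? (fun kv => kv.1 == "degree")).map (·.2) with
    | none => none  -- KeyError
    | some degree =>
      if PySem.Dict.getD degreeHierarchy (PySem.Str.lower degree) 0 = L then some (some degree)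
      else bScan L rest

-- outer loop over the tiers 5, 4, 3, 2: first tier with a hit wins
def bLoop (education : List (List (String × String))) : List Int → Option (Option String)
  | [] => some none
  | L :: Ls =>
    match bScan L education with
    | none => none  -- KeyError propagates
    | some (some d) => some (some d)
    | some none => bLoop education Ls

def determine_highest_degree_alt (education : List (List (String × String))) : Option String :=
  (bLoop education [5, 4, 3, 2]).getD none

-- ===== PRECONDITION & SPEC =====
-- Pre_ excludes exactly the inputs where A raises KeyError: an entry without a 'degree' key.
def Pre_determine_highest_degree (education : List (List (String × String))) : Prop :=
  ∀ edu ∈ education, edu.any (fun kv => kv.1 == "degree")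
instance (education : List (List (String × String))) : Decidable (Pre_determine_highest_degree education) := by unfold Pre_determine_highest_degree; infer_instance

def pvWitness_determine_highest_degree : (List (List (String × String))) :=
  [[("degree", "PhD")], [("degree", "ba"), ("year", "2001")]]

def Spec_determine_highest_degree (education : List (List (String × String))) (out : Option String) : Prop := out = determine_highest_degree_alt education
instance (education : List (List (String × String))) (out : Option String) : Decidable (Spec_determine_highest_degree education out) := by unfold Spec_determine_highest_degree; infer_instance

-- ===== CLAIM (what is proved, stated in full; the proofs are below) =====
def Claim_equal_determine_highest_degree : Prop := ∀ (education : List (List (String × String))), Dom_determine_highest_degree education → Pre_determine_highest_degree education → Spec_determine_highest_degree education (determine_highest_degree education)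
-- ===== LEMMAS AND PROOFS =====

-- the degree string and level of an entry, as both programs compute them under Pre_
def degOf (edu : List (String × String)) : String :=
  ((edu.find? (fun kv => kv.1 == "degree")).map (·.2)).getD ""

def levOf (edu : List (String × String)) : Int :=
  PySem.Dict.getD degreeHierarchy (PySem.Str.lower (degOf edu)) 0

def maxLev : List (List (String × String)) → Int
  | [] => 0
  | e :: r => max (levOf e) (maxLev r)

theorem levOf_range (e : List (String × String)) :
    levOf e = 0 ∨ levOf e = 2 ∨ levOf e = 3 ∨ levOf e = 4 ∨ levOf e = 5 := by
  unfold levOf degreeHierarchy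
  simp only [PySem.Dict.getD_eq_get?_getD]
  repeat rw [PySem.Dict.get?_mk_cons]
  split_ifs <;> simp [PySem.Dict.get?]

theorem maxLev_nonneg (xs : List (List (String × String))) : 0 ≤ maxLev xs := by
  induction xs with
  | nil => simp [maxLev]
  | cons e r ih => simp only [maxLev]; omega

theorem levOf_le_maxLev {e : List (String × String)} {xs : List (List (String × String))}
    (h : e ∈ xs) : levOf e ≤ maxLev xs := by
  induction xs with
  | nil => cases h
  | cons a r ih =>
    rcases List.mem_cons.mp h with rfl | h
    · simp [maxLev]
    · have := ih h; simp only [maxLev]; omega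

theorem maxLev_attained {xs : List (List (String × String))} (h : 0 < maxLev xs) :
    ∃ e ∈ xs, levOf e = maxLev xs := by
  induction xs with
  | nil => simp [maxLev] at h
  | cons a r ih =>
    simp only [maxLev] at h ⊢
    by_cases hle : maxLev r ≤ levOf a
    · exact ⟨a, List.mem_cons_self, by omega⟩
    · obtain ⟨e, he, hev⟩ := ih (by omega)
      exact ⟨e, List.mem_cons_of_mem _ he, by omega⟩

theorem bScan_eq_find? (L : Int) (xs : List (List (String × String)))
    (hpre : ∀ edu ∈ xs, edu.any (fun kv => kv.1 == "degree")) :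
    bScan L xs = some ((xs.find? (fun e => levOf e == L)).map degOf) := by
  induction xs with
  | nil => rfl
  | cons e r ih =>
    have he : e.any (fun kv => kv.1 == "degree") := hpre e List.mem_cons_self
    obtain ⟨kv, hkv⟩ : ∃ kv, e.find? (fun kv => kv.1 == "degree") = some kv := by
      cases hf : e.find? (fun kv => kv.1 == "degree") with
      | some kv => exact ⟨kv, rfl⟩
      | none =>
        rw [List.find?_eq_none] at hf
        rw [List.any_eq_true] at he
        obtain ⟨x, hx, hxp⟩ := he
        exact absurd hxp (by simpa using hf x hx)
    have hdeg : degOf e = kv.2 := by simp [degOf, hkv]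
    simp only [bScan, hkv, Option.map_some, hdeg.symm]
    by_cases h : PySem.Dict.getD degreeHierarchy (PySem.Str.lower (degOf e)) 0 = L
    · rw [if_pos h, List.find?_cons_of_pos (by simp [levOf, h]), Option.map_some]
    · rw [if_neg h, List.find?_cons_of_neg (by simp [levOf, h]),
        ih (fun edu hm => hpre edu (List.mem_cons_of_mem _ hm))]

theorem bScan_none_of_gt {L : Int} {xs : List (List (String × String))}
    (hpre : ∀ edu ∈ xs, edu.any (fun kv => kv.1 == "degree"))
    (h : maxLev xs < L) : bScan L xs = some none := by
  rw [bScan_eq_find? L xs hpre]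
  have : xs.find? (fun e => levOf e == L) = none := by
    rw [List.find?_eq_none]
    intro e he
    have := levOf_le_maxLev he
    simp only [beq_iff_eq]; omega
  simp [this]

-- B computes: first entry at the maximal tier (none when no entry is at a known tier)
theorem alt_eq (xs : List (List (String × String)))
    (hpre : ∀ edu ∈ xs, edu.any (fun kv => kv.1 == "degree")) :
    determine_highest_degree_alt xs =
      if 0 < maxLev xs then (xs.find? (fun e => levOf e == maxLev xs)).map degOf
      else none := by
  unfold determine_highest_degree_alt
  by_cases hpos : 0 < maxLev xs
  · obtain ⟨e, he, hev⟩ := maxLev_attained hpos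
    rw [if_pos hpos]
    obtain ⟨v, hv⟩ : ∃ v, (xs.find? (fun e' => levOf e' == maxLev xs)).map degOf = some v := by
      have hs : (xs.find? (fun e' => levOf e' == maxLev xs)).isSome :=
        List.find?_isSome.mpr ⟨e, he, by simp [hev]⟩
      cases hf : xs.find? (fun e' => levOf e' == maxLev xs) with
      | none => rw [hf] at hs; simp at hs
      | some a => exact ⟨degOf a, rfl⟩
    have key : bScan (maxLev xs) xs = some (some v) := by
      rw [bScan_eq_find? _ _ hpre, hv]
    rw [hv]
    have hr := levOf_range e
    rw [hev] at hr
    rcases hr with h0 | h2 | h3 | h4 | h5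
    · omega
    · have n5 : bScan 5 xs = some none := bScan_none_of_gt hpre (by omega)
      have n4 : bScan 4 xs = some none := bScan_none_of_gt hpre (by omega)
      have n3 : bScan 3 xs = some none := bScan_none_of_gt hpre (by omega)
      rw [h2] at key
      simp [bLoop, n5, n4, n3, key]
    · have n5 : bScan 5 xs = some none := bScan_none_of_gt hpre (by omega)
      have n4 : bScan 4 xs = some none := bScan_none_of_gt hpre (by omega)
      rw [h3] at key
      simp [bLoop, n5, n4, key]
    · have n5 : bScan 5 xs = some none := bScan_none_of_gt hpre (by omega)
      rw [h4] at key
      simp [bLoop, n5, key]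
    · rw [h5] at key
      simp [bLoop, key]
  · rw [if_neg hpos]
    have h := maxLev_nonneg xs
    have n : ∀ L : Int, maxLev xs < L → bScan L xs = some none :=
      fun L hL => bScan_none_of_gt hpre hL
    simp [bLoop, n 5 (by omega), n 4 (by omega), n 3 (by omega), n 2 (by omega)]

-- A's loop, under Pre_, computes the same "first entry at the (new) maximal tier"
theorem aLoop_eq (xs : List (List (String × String))) :
    ∀ (maxL : Int) (h : Option String), 0 ≤ maxL →
    (∀ edu ∈ xs, edu.any (fun kv => kv.1 == "degree")) →
    aLoop xs maxL h =
      some (if maxL < maxLev xs then (xs.find? (fun e => levOf e == maxLev xs)).map degOf else h) := by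
  induction xs with
  | nil =>
    intro maxL h hnn _
    simp only [aLoop, maxLev]
    rw [if_neg (by omega)]
  | cons e r ih =>
    intro maxL h hnn hpre
    have he : e.any (fun kv => kv.1 == "degree") := hpre e List.mem_cons_self
    obtain ⟨kv, hkv⟩ : ∃ kv, e.find? (fun kv => kv.1 == "degree") = some kv := by
      cases hf : e.find? (fun kv => kv.1 == "degree") with
      | some kv => exact ⟨kv, rfl⟩
      | none =>
        rw [List.find?_eq_none] at hf
        rw [List.any_eq_true] at he
        obtain ⟨x, hx, hxp⟩ := he
        exact absurd hxp (by simpa using hf x hx)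
    have hdeg : degOf e = kv.2 := by simp [degOf, hkv]
    have hpre' : ∀ edu ∈ r, edu.any (fun kv => kv.1 == "degree") :=
      fun edu hm => hpre edu (List.mem_cons_of_mem _ hm)
    simp only [aLoop, hkv, Option.map_some, hdeg.symm, maxLev]
    rw [show PySem.Dict.getD degreeHierarchy (PySem.Str.lower (degOf e)) 0 = levOf e from rfl]
    by_cases hgt : maxL < levOf e
    · rw [if_pos hgt, ih _ _ (by omega) hpre']
      by_cases hle : maxLev r ≤ levOf e
      · rw [if_neg (by omega), if_pos (by omega),
          List.find?_cons_of_pos (by simp; omega), Option.map_some]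
      · rw [if_pos (by omega), if_pos (by omega),
          List.find?_cons_of_neg (by simp; omega)]
        have hmx : max (levOf e) (maxLev r) = maxLev r := max_eq_right (by omega)
        rw [hmx]
    · rw [if_neg hgt, ih _ _ hnn hpre']
      by_cases hr : maxL < maxLev r
      · rw [if_pos hr, if_pos (by omega),
          List.find?_cons_of_neg (by simp; omega)]
        have hmx : max (levOf e) (maxLev r) = maxLev r := max_eq_right (by omega)
        rw [hmx]
      · rw [if_neg hr, if_neg (by omega)]

-- ===== VERDICT (by name: the statement is the Claim_ definition above) =====
theorem determine_highest_degree_spec : Claim_equal_determine_highest_degree := by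
  intro education _ hpre
  unfold Spec_determine_highest_degree determine_highest_degree
  rw [alt_eq education hpre]
  by_cases hnil : education = []
  · subst hnil; simp [maxLev]
  · rw [if_neg hnil, aLoop_eq education 0 none le_rfl hpre]
    by_cases hpos : 0 < maxLev education <;> simp [hpos]
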